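-- pv_equiv track=rewrite | github.com/ItaloLujanPedreschi/aoc-2024 | day_2.py | is_valid_r
-- ===== SOURCE A (Python) =====
-- def is_valid_r(nums, prev_index, index, increasing, contains_error):
--   if index == len(nums): return True
--   if prev_index == -1:
--     return is_valid_r(nums, index, index + 1, increasing, contains_error)
--
--   curr_error = False
--   if increasing:
--     if nums[index] <= nums[prev_index] or nums[index] > nums[prev_index] + 3:
--       curr_error = True
--   else:
--     if nums[index] >= nums[prev_index] or nums[index] < nums[prev_index] - 3:
--       curr_error = True
--
--   if contains_error and curr_error: return False
--   if curr_error: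
--     return (is_valid_r(nums, prev_index, index + 1, increasing, True) or
--             is_valid_r(nums, prev_index - 1, index, increasing, True))
--   else:
--     return is_valid_r(nums, index, index + 1, increasing, contains_error)
-- ===== SOURCE B (Python) =====
-- def is_valid_r(nums, prev_index, index, increasing, contains_error):
--     def step_ok(p, i):
--         if increasing:
--             return nums[p] < nums[i] <= nums[p] + 3
--         return nums[p] - 3 <= nums[i] < nums[p]
--
--     def scan(p, i):
--         # linear sweep to the end: no further violation allowed
--         while i < len(nums):
--             if p != -1 and not step_ok(p, i):
--                 return False
--             p, i = i, i + 1
--         return True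
--
--     p, i = prev_index, index
--     while i < len(nums):
--         if p == -1 or step_ok(p, i):
--             p, i = i, i + 1
--         elif contains_error:
--             return False
--         else:
--             # first violation: either drop nums[i] or drop nums[p]
--             return scan(p, i + 1) or scan(p - 1, i)
--     return True
-- ===== Notes on version B (the rewrite author's own statement) =====
-- stated objective: simpler
-- what changed: Replaces A's branching recursion (which re-enters itself on both repair attempts) by an iterative while-loop over (prev, index) plus a small linear helper scan; on the first violation it returns scan(prev, index+1) or scan(prev-1, index).
-- outside the precondition, e.g. on is_valid_r([1, 2], -2, 1, True, False): A returns True, B returns True; on is_valid_r([1, 2], -1, -2, True, False): A returns True, B returns True; on is_valid_r([3, 1, 9], -3, 1, True, False): A raises IndexError, B raises IndexError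
import Mathlib
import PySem

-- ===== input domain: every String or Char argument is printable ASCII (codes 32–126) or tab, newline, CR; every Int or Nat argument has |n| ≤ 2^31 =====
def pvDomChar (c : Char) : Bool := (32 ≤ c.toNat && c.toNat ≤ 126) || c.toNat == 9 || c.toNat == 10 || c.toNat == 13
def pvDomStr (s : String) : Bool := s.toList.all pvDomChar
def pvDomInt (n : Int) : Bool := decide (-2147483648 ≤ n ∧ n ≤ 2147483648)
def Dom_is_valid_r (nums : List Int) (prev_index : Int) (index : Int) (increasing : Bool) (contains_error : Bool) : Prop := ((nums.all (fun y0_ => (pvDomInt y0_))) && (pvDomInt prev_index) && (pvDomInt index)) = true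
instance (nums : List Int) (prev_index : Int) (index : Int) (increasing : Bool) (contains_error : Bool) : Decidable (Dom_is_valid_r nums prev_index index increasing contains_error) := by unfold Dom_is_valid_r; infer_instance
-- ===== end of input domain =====

-- B replaces A's branching recursion by an iterative sweep with a small linear repair
-- helper; objective: simpler (same linear cost, no recursion).

-- ===== PORT A =====
-- Literal transliteration of A's recursion. Where the Python raises
-- (IndexError from an out-of-range lookup, or unbounded recursion when
-- prev_index = -1 and index > len(nums)) the port returns false; all such
-- inputs are excluded by Pre_is_valid_r.
def is_valid_r (nums : List Int) (prev_index : Int) (index : Int) (increasing : Bool) (contains_error : Bool) : Bool :=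
  if _h1 : index = (nums.length : Int) then true
  else if _h2 : (nums.length : Int) < index then false  -- Python raises/diverges here (outside Pre_)
  else if _h3 : prev_index = -1 then
    is_valid_r nums index (index + 1) increasing contains_error
  else
    match PySem.List.pyGet? nums index, PySem.List.pyGet? nums prev_index with
    | some ni, some np =>
      let curr_error : Bool :=
        if increasing then decide (ni ≤ np) || decide (np + 3 < ni)
        else decide (np ≤ ni) || decide (ni < np - 3)
      if _h4 : contains_error && curr_error then false
      else if _h5 : curr_error then
        is_valid_r nums prev_index (index + 1) increasing true
          || is_valid_r nums (prev_index - 1) index increasing true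
      else is_valid_r nums index (index + 1) increasing contains_error
    | _, _ => false  -- Python raises IndexError here (outside Pre_)
termination_by 2 * ((nums.length : Int) + 1 - index).toNat + (if contains_error then 0 else 1)
decreasing_by
  all_goals simp_wf
  all_goals try omega
  cases contains_error <;> simp_all

-- ===== PORT B =====
def pvStepOk (nums : List Int) (increasing : Bool) (p i : Int) : Bool :=
  match PySem.List.pyGet? nums p with
  | none => false  -- Python raises IndexError here (outside Pre_)
  | some np =>
    match PySem.List.pyGet? nums i with
    | none => false  -- Python raises IndexError here (outside Pre_)
    | some ni =>
      if increasing then decide (np < ni) && decide (ni ≤ np + 3)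
      else decide (np - 3 ≤ ni) && decide (ni < np)

-- Source B's `scan`: linear sweep to the end, no further violation allowed
def pvScan (nums : List Int) (increasing : Bool) (p i : Int) : Bool :=
  if _h : i < (nums.length : Int) then
    if (p != -1) && !(pvStepOk nums increasing p i) then false
    else pvScan nums increasing i (i + 1)
  else true
termination_by ((nums.length : Int) - i).toNat
decreasing_by simp_wf; omega

-- Source B's main while loop
def pvMain (nums : List Int) (increasing : Bool) (contains_error : Bool) (p i : Int) : Bool :=
  if _h : i < (nums.length : Int) then
    if (p == -1) || pvStepOk nums increasing p i then
      pvMain nums increasing contains_error i (i + 1)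
    else if contains_error then false
    else pvScan nums increasing p (i + 1) || pvScan nums increasing (p - 1) i
  else true
termination_by ((nums.length : Int) - i).toNat
decreasing_by simp_wf; omega

def is_valid_r_alt (nums : List Int) (prev_index : Int) (index : Int) (increasing : Bool) (contains_error : Bool) : Bool :=
  pvMain nums increasing contains_error prev_index index

-- ===== PRECONDITION & SPEC =====
-- Pre_ admits index = len(nums) (immediate True) and every call whose indices — including
-- Python's in-range negative (wraparound) ones, but not the extreme -len, whose repair step
-- p-1 can fall off the left end — stay inside [-len+1, len-1] apart from the prev_index = -1
-- sentinel; on all such calls A returns. Excluded: index > len, where A raises IndexError or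
-- recurses without bound; and calls indexing outside that range, where A raises IndexError —
-- or, value-dependently, returns only by short-circuit luck, an accident of A's implementation
-- (e.g. A([3,1,9],-3,1,True,False) raises while A([1,2],-2,1,True,False) returns).
def Pre_is_valid_r (nums : List Int) (prev_index : Int) (index : Int) (increasing : Bool) (contains_error : Bool) : Prop :=
  index = (nums.length : Int) ∨
    ((-(nums.length : Int) + 1 ≤ index ∧ index ≤ (nums.length : Int)) ∧
      (prev_index = -1 ∨
        (-(nums.length : Int) + 1 ≤ prev_index ∧ prev_index < (nums.length : Int))))
instance (nums : List Int) (prev_index : Int) (index : Int) (increasing : Bool) (contains_error : Bool) : Decidable (Pre_is_valid_r nums prev_index index increasing contains_error) := by unfold Pre_is_valid_r; infer_instance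

def pvWitness_is_valid_r : List Int × Int × Int × Bool × Bool := ([1, 2, 4], -1, 0, true, false)

def Spec_is_valid_r (nums : List Int) (prev_index : Int) (index : Int) (increasing : Bool) (contains_error : Bool) (out : Bool) : Prop := out = is_valid_r_alt nums prev_index index increasing contains_error
instance (nums : List Int) (prev_index : Int) (index : Int) (increasing : Bool) (contains_error : Bool) (out : Bool) : Decidable (Spec_is_valid_r nums prev_index index increasing contains_error out) := by unfold Spec_is_valid_r; infer_instance

-- ===== CLAIM (what is proved, stated in full; the proofs are below) =====
def Claim_equal_is_valid_r : Prop := ∀ (nums : List Int) (prev_index : Int) (index : Int) (increasing : Bool) (contains_error : Bool), Dom_is_valid_r nums prev_index index increasing contains_error → Pre_is_valid_r nums prev_index index increasing contains_error → Spec_is_valid_r nums prev_index index increasing contains_error (is_valid_r nums prev_index index increasing contains_error)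


-- ===== LEMMAS AND PROOFS =====

-- A's error test is the negation of B's step test
theorem pv_err_eq (increasing : Bool) (np ni : Int) :
    (if increasing then decide (ni ≤ np) || decide (np + 3 < ni)
     else decide (np ≤ ni) || decide (ni < np - 3))
    = !(if increasing then decide (np < ni) && decide (ni ≤ np + 3)
        else decide (np - 3 ≤ ni) && decide (ni < np)) := by
  cases increasing <;>
    · rw [Bool.eq_iff_iff]
      simp
      try omega

-- an in-range (possibly negative) Python index always yields a value
theorem pv_get_some (nums : List Int) (k : Int) (h1 : -(nums.length : Int) ≤ k)
    (h2 : k < (nums.length : Int)) : ∃ v, PySem.List.pyGet? nums k = some v := by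
  cases hv : PySem.List.pyGet? nums k with
  | none =>
    rw [PySem.List.pyGet?_eq_none_iff] at hv
    exact absurd ⟨h1, h2⟩ hv
  | some v => exact ⟨v, rfl⟩

-- A with contains_error = true behaves like Source B's `scan`
theorem pv_scan_eq (nums : List Int) (increasing : Bool) :
    ∀ (n : Nat) (p i : Int), ((nums.length : Int) - i).toNat = n →
      (p = -1 ∨ (-(nums.length : Int) ≤ p ∧ p < (nums.length : Int))) →
      -(nums.length : Int) ≤ i → i ≤ (nums.length : Int) →
      is_valid_r nums p i increasing true = pvScan nums increasing p i := by
  intro n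
  induction n with
  | zero =>
    intro p i hn hp hi0 hil
    have hi : i = (nums.length : Int) := by omega
    rw [is_valid_r, pvScan]
    simp [hi]
  | succ n ih =>
    intro p i hn hp hi0 hil
    have hi : i < (nums.length : Int) := by omega
    rw [is_valid_r, pvScan]
    simp only [hi, dif_pos]
    rw [dif_neg (by omega), dif_neg (by omega)]
    by_cases hp1 : p = -1
    · rw [dif_pos hp1]
      have hcond : ((p != -1) && !(pvStepOk nums increasing p i)) = false := by
        simp [hp1]
      rw [hcond]
      simp only [Bool.false_eq_true, if_false]
      exact ih i (i + 1) (by omega) (Or.inr ⟨by omega, by omega⟩) (by omega) (by omega)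
    · rw [dif_neg hp1]
      have hpb := hp.resolve_left hp1
      obtain ⟨ni', hni⟩ := pv_get_some nums i (by omega) (by omega)
      obtain ⟨np', hnp⟩ := pv_get_some nums p (by omega) (by omega)
      rw [hni, hnp]
      simp only []
      have hstep : pvStepOk nums increasing p i
          = (if increasing then decide (np' < ni') && decide (ni' ≤ np' + 3)
             else decide (np' - 3 ≤ ni') && decide (ni' < np')) := by
        unfold pvStepOk; rw [hnp, hni]
      have hcond : ((p != -1) && !(pvStepOk nums increasing p i))
          = (if increasing then decide (ni' ≤ np') || decide (np' + 3 < ni')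
             else decide (np' ≤ ni') || decide (ni' < np' - 3)) := by
        rw [pv_err_eq, hstep]
        simp [bne_iff_ne, hp1]
      by_cases herr : (if increasing then decide (ni' ≤ np') || decide (np' + 3 < ni')
             else decide (np' ≤ ni') || decide (ni' < np' - 3)) = true
      · rw [hcond, herr]
        rw [dif_pos (by simp)]
        simp
      · rw [hcond]
        rw [dif_neg (by simp [herr])]
        rw [dif_neg (by simp [herr])]
        simp only [Bool.not_eq_true] at herr
        simp only [herr, Bool.false_eq_true, if_false]
        exact ih i (i + 1) (by omega) (Or.inr ⟨by omega, by omega⟩) (by omega) (by omega)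

-- A equals Source B's main loop on the intended call shape
theorem pv_main_eq (nums : List Int) (increasing : Bool) :
    ∀ (n : Nat) (p i : Int) (ce : Bool), ((nums.length : Int) - i).toNat = n →
      (p = -1 ∨ (-(nums.length : Int) + 1 ≤ p ∧ p < (nums.length : Int))) →
      -(nums.length : Int) + 1 ≤ i → i ≤ (nums.length : Int) →
      is_valid_r nums p i increasing ce = pvMain nums increasing ce p i := by
  intro n
  induction n with
  | zero =>
    intro p i ce hn hp hi0 hil
    have hi : i = (nums.length : Int) := by omega
    rw [is_valid_r, pvMain]
    simp [hi]
  | succ n ih =>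
    intro p i ce hn hp hi0 hil
    have hi : i < (nums.length : Int) := by omega
    rw [is_valid_r, pvMain]
    simp only [hi, dif_pos]
    rw [dif_neg (by omega), dif_neg (by omega)]
    by_cases hp1 : p = -1
    · rw [dif_pos hp1]
      have hcond : ((p == -1) || pvStepOk nums increasing p i) = true := by
        simp [hp1]
      rw [hcond]
      simp only [if_true]
      exact ih i (i + 1) ce (by omega) (Or.inr ⟨by omega, by omega⟩) (by omega) (by omega)
    · rw [dif_neg hp1]
      have hpb := hp.resolve_left hp1
      obtain ⟨ni', hni⟩ := pv_get_some nums i (by omega) (by omega)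
      obtain ⟨np', hnp⟩ := pv_get_some nums p (by omega) (by omega)
      rw [hni, hnp]
      simp only []
      have hstep : pvStepOk nums increasing p i
          = (if increasing then decide (np' < ni') && decide (ni' ≤ np' + 3)
             else decide (np' - 3 ≤ ni') && decide (ni' < np')) := by
        unfold pvStepOk; rw [hnp, hni]
      have hcond : ((p == -1) || pvStepOk nums increasing p i)
          = !(if increasing then decide (ni' ≤ np') || decide (np' + 3 < ni')
              else decide (np' ≤ ni') || decide (ni' < np' - 3)) := by
        rw [pv_err_eq, hstep]
        simp [hp1]
      by_cases herr : (if increasing then decide (ni' ≤ np') || decide (np' + 3 < ni')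
             else decide (np' ≤ ni') || decide (ni' < np' - 3)) = true
      · -- violation step
        rw [hcond, herr]
        simp only [Bool.not_true, Bool.false_eq_true, if_false]
        cases ce with
        | true =>
          rw [dif_pos (by simp)]
          simp
        | false =>
          rw [dif_neg (by simp)]
          rw [dif_pos trivial]
          simp only [Bool.false_eq_true, if_false]
          rw [pv_scan_eq nums increasing ((nums.length : Int) - (i + 1)).toNat p (i + 1) rfl
                (Or.inr ⟨by omega, by omega⟩) (by omega) (by omega),
              pv_scan_eq nums increasing ((nums.length : Int) - i).toNat (p - 1) i rfl
                (Or.inr ⟨by omega, by omega⟩) (by omega) (by omega)]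
      · -- clean step
        rw [hcond]
        rw [dif_neg (by simp [herr])]
        rw [dif_neg (by simp [herr])]
        simp only [Bool.not_eq_true] at herr
        simp only [herr, Bool.not_false, if_true]
        exact ih i (i + 1) ce (by omega) (Or.inr ⟨by omega, by omega⟩) (by omega) (by omega)

-- ===== VERDICT (by name: the statement is the Claim_ definition above) =====
theorem is_valid_r_spec : Claim_equal_is_valid_r := by
  intro nums prev_index index increasing contains_error _hdom hpre
  unfold Spec_is_valid_r is_valid_r_alt
  rcases hpre with hlen | ⟨⟨hia, hib⟩, hpd⟩
  · rw [is_valid_r, pvMain]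
    simp [hlen]
  · exact pv_main_eq nums increasing ((nums.length : Int) - index).toNat prev_index index
      contains_error rfl hpd hia hib
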